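-- pv_equiv track=rewrite | github.com/containers/ramalama | ramalama/model_store/template_conversion.py | wrap_template_with_messages_loop
-- ===== SOURCE A (Python) =====
-- def wrap_template_with_messages_loop(jinja_template: str) -> str:
--     """
--     Wrap a flat-variable Jinja template with OpenAI messages loop.
--
--     Input: {% if system %}...{% endif %}{% if prompt %}...{% endif %}
--     Output: {% for message in messages %}{% if message.role == 'system' %}...
--         {% if message.role == 'user' %}...{% endfor %}
--     """
--     # First, pull out the final assistant chunk if present
--     split_point = jinja_template.rfind('<|assistant|>')
--     if split_point == -1:
--         split_point = len(jinja_template)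
--     else:
--         last_control_end = jinja_template.rfind('%}', 0, split_point)
--         if last_control_end != -1:
--             split_point = last_control_end + 2
--
--     wrapped = jinja_template[:split_point]
--     final_assistant_output = jinja_template[split_point:]
--
--     role_map = {"system": "system", "prompt": "user", "user": "user", "response": "assistant", "assistant": "assistant"}
--     control_directives = ['if', 'elif']
--
--     # Substitute for control directives and role labels
--     for role, new_role in role_map.items():
--         for directive in control_directives:
--             wrapped = wrapped.replace(
--                 f"{{% {directive} {role} %}}", f"{{% {directive} message.role == '{new_role}' %}}"
--             )
--         wrapped = wrapped.replace(f"{{{{ {role} }}}}", "{{ message.content }}")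
--
--     # recombine wrapped template
--     return f"{{% for message in messages %}}{wrapped}{{% endfor %}}{final_assistant_output}"
-- ===== SOURCE B (Python) =====
-- def wrap_template_with_messages_loop(jinja_template: str) -> str:
--     # Same split logic as before: pull out the final assistant chunk if present.
--     split_point = jinja_template.rfind('<|assistant|>')
--     if split_point == -1:
--         split_point = len(jinja_template)
--     else:
--         last_control_end = jinja_template.rfind('%}', 0, split_point)
--         if last_control_end != -1:
--             split_point = last_control_end + 2
--
--     wrapped = jinja_template[:split_point]
--     final_assistant_output = jinja_template[split_point:]
--
--     # One flat rule table, then a SINGLE left-to-right scan performing all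
--     # substitutions simultaneously (instead of 15 sequential .replace passes).
--     role_map = {"system": "system", "prompt": "user", "user": "user", "response": "assistant", "assistant": "assistant"}
--     rules = []
--     for role, new_role in role_map.items():
--         rules.append((f"{{% if {role} %}}", f"{{% if message.role == '{new_role}' %}}"))
--         rules.append((f"{{% elif {role} %}}", f"{{% elif message.role == '{new_role}' %}}"))
--         rules.append((f"{{{{ {role} }}}}", "{{ message.content }}"))
--
--     out = []
--     i = 0
--     n = len(wrapped)
--     while i < n:
--         for pat, rep in rules:
--             if wrapped.startswith(pat, i):
--                 out.append(rep)
--                 i += len(pat)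
--                 break
--         else:
--             out.append(wrapped[i])
--             i += 1
--
--     return f"{{% for message in messages %}}{''.join(out)}{{% endfor %}}{final_assistant_output}"
-- ===== Notes on version B (the rewrite author's own statement) =====
-- stated objective: alternative
-- what changed: The 15 sequential str.replace passes (one per role/directive pattern) are replaced by one flat rule table and a SINGLE left-to-right scan that performs all substitutions simultaneously in one pass over the template.
import Mathlib
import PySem

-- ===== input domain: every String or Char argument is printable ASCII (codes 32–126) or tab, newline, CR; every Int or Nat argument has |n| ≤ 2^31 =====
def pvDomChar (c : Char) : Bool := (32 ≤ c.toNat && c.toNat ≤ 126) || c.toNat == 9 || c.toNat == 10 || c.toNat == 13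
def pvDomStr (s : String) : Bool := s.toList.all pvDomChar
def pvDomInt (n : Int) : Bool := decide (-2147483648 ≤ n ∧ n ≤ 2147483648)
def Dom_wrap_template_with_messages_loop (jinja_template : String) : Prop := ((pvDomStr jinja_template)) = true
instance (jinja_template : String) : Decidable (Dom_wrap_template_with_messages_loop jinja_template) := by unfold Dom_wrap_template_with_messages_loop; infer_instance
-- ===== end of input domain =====

-- B replaces A's 15 sequential .replace passes by one flat rule table and a single
-- left-to-right scan doing all substitutions simultaneously (alternative algorithm, no speed claim).

-- ===== PORT A =====
def wrap_template_with_messages_loop (jinja_template : String) : String :=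
  let split_point := PySem.Str.rfind jinja_template "<|assistant|>"
  let split_point :=
    if split_point = -1 then PySem.Str.len jinja_template
    else
      let last_control_end := PySem.Str.rfindFrom jinja_template "%}" 0 (some split_point)
      if last_control_end ≠ -1 then last_control_end + 2 else split_point
  let wrapped := PySem.Str.slice jinja_template none (some split_point)
  let final_assistant_output := PySem.Str.slice jinja_template (some split_point) none
  let role_map : List (String × String) :=
    [("system", "system"), ("prompt", "user"), ("user", "user"),
     ("response", "assistant"), ("assistant", "assistant")]
  let control_directives : List String := ["if", "elif"]
  let wrapped := role_map.foldl (fun wrapped rn =>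
      let wrapped := control_directives.foldl (fun wrapped directive =>
          PySem.Str.replace wrapped ("{% " ++ directive ++ " " ++ rn.1 ++ " %}")
            ("{% " ++ directive ++ " message.role == '" ++ rn.2 ++ "' %}")) wrapped
      PySem.Str.replace wrapped ("{{ " ++ rn.1 ++ " }}") "{{ message.content }}") wrapped
  "{% for message in messages %}" ++ wrapped ++ "{% endfor %}" ++ final_assistant_output

-- ===== PORT B =====
-- B-side helper: the 'while i < n' scan of Source B over the rule table, as recursion on the
-- remaining character list (out.append(...) becomes prepending to the recursive result).
lemma pvScanDropLt (t : List Char) (k : Nat) (c : Char) :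
    (t.drop k).length < (c :: t).length := by
  simp [List.length_drop]

def pvScan (rules : List (List Char × List Char)) : List Char → List Char
  | [] => []
  | c :: t =>
    match rules.find? (fun pr => pr.1.isPrefixOf (c :: t)) with
    | some pr => pr.2 ++ pvScan rules (t.drop (pr.1.length - 1))
    | none => c :: pvScan rules t
termination_by l => l.length
decreasing_by
  all_goals first
    | exact pvScanDropLt t (pr.1.length - 1) c
    | simp

def wrap_template_with_messages_loop_alt (jinja_template : String) : String :=
  let split_point := PySem.Str.rfind jinja_template "<|assistant|>"
  let split_point :=
    if split_point = -1 then PySem.Str.len jinja_template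
    else
      let last_control_end := PySem.Str.rfindFrom jinja_template "%}" 0 (some split_point)
      if last_control_end ≠ -1 then last_control_end + 2 else split_point
  let wrapped := PySem.Str.slice jinja_template none (some split_point)
  let final_assistant_output := PySem.Str.slice jinja_template (some split_point) none
  let role_map : List (String × String) :=
    [("system", "system"), ("prompt", "user"), ("user", "user"),
     ("response", "assistant"), ("assistant", "assistant")]
  let rules : List (String × String) := role_map.foldl (fun acc rn =>
      acc ++ [("{% if " ++ rn.1 ++ " %}", "{% if message.role == '" ++ rn.2 ++ "' %}"),
              ("{% elif " ++ rn.1 ++ " %}", "{% elif message.role == '" ++ rn.2 ++ "' %}"),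
              ("{{ " ++ rn.1 ++ " }}", "{{ message.content }}")]) []
  let out := pvScan (rules.map (fun pr => (pr.1.toList, pr.2.toList))) wrapped.toList
  "{% for message in messages %}" ++ String.ofList out ++ "{% endfor %}" ++ final_assistant_output

-- ===== PRECONDITION & SPEC =====
def Spec_wrap_template_with_messages_loop (jinja_template : String) (out : String) : Prop := out = wrap_template_with_messages_loop_alt jinja_template
instance (jinja_template : String) (out : String) : Decidable (Spec_wrap_template_with_messages_loop jinja_template out) := by unfold Spec_wrap_template_with_messages_loop; infer_instance

-- ===== CLAIM (what is proved, stated in full; the proofs are below) =====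
def Claim_equal_wrap_template_with_messages_loop : Prop := ∀ (jinja_template : String), Dom_wrap_template_with_messages_loop jinja_template → Spec_wrap_template_with_messages_loop jinja_template (wrap_template_with_messages_loop jinja_template)

-- ===== LEMMAS AND PROOFS =====
-- Proof-side helpers: the 15 (pattern, replacement) pairs both programs use, the
-- A-side chain of sequential replaces, and the lemmas showing chain = single scan.
def pvPairs : List (String × String) := [
  ("{% if system %}", "{% if message.role == 'system' %}"),
  ("{% elif system %}", "{% elif message.role == 'system' %}"),
  ("{{ system }}", "{{ message.content }}"),
  ("{% if prompt %}", "{% if message.role == 'user' %}"),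
  ("{% elif prompt %}", "{% elif message.role == 'user' %}"),
  ("{{ prompt }}", "{{ message.content }}"),
  ("{% if user %}", "{% if message.role == 'user' %}"),
  ("{% elif user %}", "{% elif message.role == 'user' %}"),
  ("{{ user }}", "{{ message.content }}"),
  ("{% if response %}", "{% if message.role == 'assistant' %}"),
  ("{% elif response %}", "{% elif message.role == 'assistant' %}"),
  ("{{ response }}", "{{ message.content }}"),
  ("{% if assistant %}", "{% if message.role == 'assistant' %}"),
  ("{% elif assistant %}", "{% elif message.role == 'assistant' %}"),
  ("{{ assistant }}", "{{ message.content }}")]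

def pvRules : List (List Char × List Char) := pvPairs.map (fun pr => (pr.1.toList, pr.2.toList))

def pvChain (P : List (List Char × List Char)) (l : List Char) : List Char :=
  P.foldl (fun s pr => PySem.Chars.replace s pr.1 pr.2) l

lemma pvGoZero (o n l acc) : PySem.Chars.replace.go o n 0 l acc = acc.reverse ++ l := rfl
lemma pvGoNil (o n f acc) : PySem.Chars.replace.go o n (f+1) [] acc = acc.reverse := rfl
lemma pvGoCons (o n f c t acc) : PySem.Chars.replace.go o n (f+1) (c::t) acc =
    (if o.isPrefixOf (c::t) then PySem.Chars.replace.go o n f (List.drop o.length (c::t)) (n.reverse ++ acc)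
     else PySem.Chars.replace.go o n f t (c :: acc)) := rfl

lemma pvGoAcc (o n : List Char) (f : Nat) : ∀ (l acc : List Char),
    PySem.Chars.replace.go o n f l acc = acc.reverse ++ PySem.Chars.replace.go o n f l [] := by
  induction f with
  | zero => intro l acc; simp [pvGoZero]
  | succ f ih =>
    intro l acc
    cases l with
    | nil => simp [pvGoNil]
    | cons c t =>
      rw [pvGoCons, pvGoCons]
      split
      · rw [ih _ (n.reverse ++ acc), ih _ (n.reverse ++ [])]
        simp
      · rw [ih _ (c :: acc), ih _ (c :: [])]
        simp

lemma pvGoFuel (o n : List Char) (ho : o ≠ []) (f1 : Nat) : ∀ (f2 : Nat) (l acc : List Char),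
    l.length ≤ f1 → l.length ≤ f2 →
    PySem.Chars.replace.go o n f1 l acc = PySem.Chars.replace.go o n f2 l acc := by
  induction f1 with
  | zero =>
    intro f2 l acc h1 h2
    have : l = [] := by cases l <;> simp_all
    subst this
    cases f2 <;> simp [pvGoZero, pvGoNil]
  | succ f ih =>
    intro f2 l acc h1 h2
    cases l with
    | nil => cases f2 <;> simp [pvGoZero, pvGoNil]
    | cons c t =>
      cases f2 with
      | zero => simp at h2
      | succ f2' =>
        rw [pvGoCons, pvGoCons]
        split
        · rename_i hp
          have hlen : (List.drop o.length (c::t)).length ≤ f ∧ (List.drop o.length (c::t)).length ≤ f2' := by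
            have : 1 ≤ o.length := by cases o <;> simp_all
            simp only [List.length_drop, List.length_cons] at *
            omega
          exact ih f2' _ _ hlen.1 hlen.2
        · exact ih f2' t _ (by simp at h1 ⊢; omega) (by simp at h2 ⊢; omega)

lemma pvRepDef (o n l : List Char) (h : o ≠ []) :
    PySem.Chars.replace l o n = PySem.Chars.replace.go o n l.length l [] := by
  simp [PySem.Chars.replace, h]

lemma pvRepNil (o n : List Char) (h : o ≠ []) : PySem.Chars.replace [] o n = [] := by
  simp [pvRepDef o n [] h, pvGoZero]

lemma pvRepCons (o n : List Char) (c : Char) (t : List Char) (h : o ≠ [])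
    (hp : ¬ o <+: (c :: t)) :
    PySem.Chars.replace (c :: t) o n = c :: PySem.Chars.replace t o n := by
  rw [pvRepDef o n _ h, pvRepDef o n _ h]
  rw [show (c::t).length = t.length + 1 from rfl, pvGoCons]
  rw [if_neg (by simpa [List.isPrefixOf_iff_prefix] using hp)]
  rw [pvGoAcc]
  simp

lemma pvRepPrefix (o n x : List Char) (h : o ≠ []) :
    PySem.Chars.replace (o ++ x) o n = n ++ PySem.Chars.replace x o n := by
  rw [pvRepDef o n _ h, pvRepDef o n _ h]
  cases o with
  | nil => simp_all
  | cons oc ot =>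
    rw [List.cons_append]
    rw [show (oc :: (ot ++ x)).length = (ot.length + x.length) + 1 by simp, pvGoCons]
    rw [if_pos (by simp [List.isPrefixOf_iff_prefix])]
    have hdrop : List.drop (oc::ot).length (oc :: (ot ++ x)) = x := by
      rw [← List.cons_append]; exact List.drop_left
    rw [hdrop, pvGoAcc]
    simp only [List.reverse_reverse, List.append_nil, List.append_cancel_left_eq]
    exact pvGoFuel _ n h _ _ _ _ (by omega) (le_refl _)

lemma pvRepSplit (o n : List Char) (h : o ≠ []) : ∀ (u rest : List Char),
    (∀ k, k < u.length → ¬ o <+: (u.drop k ++ rest)) →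
    PySem.Chars.replace (u ++ rest) o n = u ++ PySem.Chars.replace rest o n := by
  intro u
  induction u with
  | nil => intro rest _; simp
  | cons c u' ih =>
    intro rest hk
    have h0 := hk 0 (by simp)
    simp only [List.drop_zero] at h0
    rw [List.cons_append, pvRepCons o n c (u' ++ rest) h (by simpa using h0)]
    rw [ih rest (fun k hk' => by simpa using hk (k+1) (by simpa using Nat.succ_lt_succ hk'))]
    simp

lemma pvScanNilRules : ∀ l, pvScan [] l = l := by
  intro l
  induction l with
  | nil => simp [pvScan]
  | cons c t ih => simp [pvScan, ih]

lemma pvScanConsNone (P : List (List Char × List Char)) (c : Char) (t : List Char)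
    (hfind : P.find? (fun pr => pr.1.isPrefixOf (c :: t)) = none) :
    pvScan P (c :: t) = c :: pvScan P t := by
  rw [pvScan, hfind]

lemma pvScanConsSome (P : List (List Char × List Char)) (c : Char) (t : List Char)
    (pr : List Char × List Char)
    (hfind : P.find? (fun pr => pr.1.isPrefixOf (c :: t)) = some pr) :
    pvScan P (c :: t) = pr.2 ++ pvScan P (t.drop (pr.1.length - 1)) := by
  rw [pvScan, hfind]

lemma pvScanSplit (P : List (List Char × List Char)) : ∀ (u rest : List Char),
    (∀ k, k < u.length → ∀ pr ∈ P, ¬ pr.1 <+: (u.drop k ++ rest)) →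
    pvScan P (u ++ rest) = u ++ pvScan P rest := by
  intro u
  induction u with
  | nil => intro rest _; simp
  | cons c u' ih =>
    intro rest hk
    have hfind : P.find? (fun pr => pr.1.isPrefixOf (c :: (u' ++ rest))) = none :=
      List.find?_eq_none.mpr (fun pr hpr => by
        simpa [List.isPrefixOf_iff_prefix] using hk 0 (by simp) pr hpr)
    rw [List.cons_append, pvScanConsNone P c (u' ++ rest) hfind,
        ih rest (fun k hk' pr hpr => by
          simpa using hk (k+1) (by simpa using Nat.succ_lt_succ hk') pr hpr)]
    simp

lemma pvScanShape (P : List (List Char × List Char)) (hne : ∀ pr ∈ P, pr.1 ≠ []) : ∀ l,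
    pvScan P l = l ∨
      ∃ a pr w, pr ∈ P ∧ l = a ++ pr.1 ++ w ∧ pvScan P l = a ++ pr.2 ++ pvScan P w := by
  intro l
  induction l with
  | nil => left; simp [pvScan]
  | cons c t ih =>
    cases hfind : P.find? (fun pr => pr.1.isPrefixOf (c :: t)) with
    | some pr =>
      right
      have hpr : pr ∈ P := List.mem_of_find?_eq_some hfind
      have hpre0 := List.find?_some hfind
      simp only at hpre0
      have hpre : pr.1 <+: (c :: t) := List.isPrefixOf_iff_prefix.mp hpre0
      obtain ⟨w, hw⟩ := hpre
      refine ⟨[], pr, w, hpr, by simpa using hw.symm, ?_⟩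
      have hdrop : t.drop (pr.1.length - 1) = w := by
        cases hp1 : pr.1 with
        | nil => exact absurd hp1 (hne pr hpr)
        | cons pc pt =>
          rw [hp1, List.cons_append] at hw
          have h1 : pt ++ w = t := by injection hw
          simp only [List.length_cons, Nat.add_sub_cancel]
          rw [← h1, List.drop_left]
      rw [pvScanConsSome P c t pr hfind, hdrop]
      simp
    | none =>
      rcases ih with hid | ⟨a, pr, w, hpr, ht, hs⟩
      · left; rw [pvScanConsNone P c t hfind, hid]
      · right
        exact ⟨c :: a, pr, w, hpr, by rw [ht]; simp,
          by rw [pvScanConsNone P c t hfind, hs]; simp⟩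

lemma pvPfxApp (q s rest : List Char) (h1 : ¬ q <+: s) (h2 : ¬ s <+: q) :
    ¬ q <+: (s ++ rest) := by
  intro h
  by_cases hle : q.length ≤ s.length
  · exact h1 (List.prefix_of_prefix_length_le h (List.prefix_append _ _) hle)
  · exact h2 (List.prefix_of_prefix_length_le (List.prefix_append _ _) h (by omega))

lemma pvNFront (P : List (List Char × List Char)) (q : List Char) (c : Char) (t : List Char)
    (hne : ∀ pr ∈ P, pr.1 ≠ [])
    (hovl : ∀ pr ∈ P, ∀ k, k < q.length → 1 ≤ k → ¬ (q.drop k <+: pr.2) ∧ ¬ (pr.2 <+: q.drop k))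
    (hq : ¬ q <+: (c :: t)) :
    ¬ q <+: (c :: pvScan P t) := by
  intro hcon
  cases hq0 : q with
  | nil => rw [hq0] at hq; exact hq (List.nil_prefix)
  | cons qc q' =>
    rw [hq0] at hcon hovl hq
    obtain ⟨z, hz⟩ := hcon
    rw [List.cons_append] at hz
    have hqc : qc = c := by injection hz
    have hq' : q' ++ z = pvScan P t := by injection hz
    have hq'pre : q' <+: pvScan P t := ⟨z, hq'⟩
    rcases pvScanShape P hne t with hid | ⟨a, pr, w, hpr, ht, hs⟩
    · rw [hid] at hq'pre
      exact hq (by rw [hqc]; exact List.cons_prefix_cons.mpr ⟨rfl, hq'pre⟩)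
    · rw [hs, List.append_assoc] at hq'pre
      by_cases hlen : q'.length ≤ a.length
      · have hqa : q' <+: a := List.prefix_of_prefix_length_le hq'pre (List.prefix_append _ _) hlen
        have hat : a <+: t := by
          rw [ht, List.append_assoc]; exact List.prefix_append _ _
        exact hq (by rw [hqc]; exact List.cons_prefix_cons.mpr ⟨rfl, hqa.trans hat⟩)
      · have haq : a <+: q' := List.prefix_of_prefix_length_le (List.prefix_append _ _) hq'pre (by omega)
        obtain ⟨s', hs'⟩ := haq
        have hs'pre : s' <+: pr.2 ++ pvScan P w := by
          rw [← hs'] at hq'pre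
          exact (List.prefix_append_right_inj a).mp hq'pre
        have hk1 : (qc :: q').drop (a.length + 1) = s' := by
          rw [List.drop_succ_cons, ← hs', List.drop_left]
        have hklt : a.length + 1 < (qc :: q').length := by
          have : a.length < q'.length := by omega
          simp only [List.length_cons]; omega
        have hov := hovl pr hpr (a.length + 1) hklt (by omega)
        rw [hk1] at hov
        exact pvPfxApp s' pr.2 (pvScan P w) hov.1 hov.2 hs'pre
lemma pvStepCore (P : List (List Char × List Char)) (q : List Char × List Char)
    (hq1 : q.1 ≠ [])
    (hne : ∀ pr ∈ P, pr.1 ≠ [])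
    (h3 : ∀ pr ∈ P, ∀ k, k < pr.2.length → ¬ (q.1 <+: pr.2.drop k) ∧ ¬ (pr.2.drop k <+: q.1))
    (h4 : ∀ pr ∈ P, ∀ k, k < q.1.length → 1 ≤ k → ¬ (pr.1 <+: q.1.drop k) ∧ ¬ (q.1.drop k <+: pr.1))
    (h5 : ∀ pr ∈ P, ∀ k, k < q.1.length → 1 ≤ k → ¬ (q.1.drop k <+: pr.2) ∧ ¬ (pr.2 <+: q.1.drop k)) :
    ∀ l, PySem.Chars.replace (pvScan P l) q.1 q.2 = pvScan (P ++ [q]) l := by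
  have main : ∀ n l, l.length ≤ n → PySem.Chars.replace (pvScan P l) q.1 q.2 = pvScan (P ++ [q]) l := by
    intro n
    induction n with
    | zero =>
      intro l hl
      have : l = [] := by cases l <;> simp_all
      subst this
      simp [pvScan, pvRepNil _ _ hq1]
    | succ n ih =>
      intro l hl
      cases l with
      | nil => simp [pvScan, pvRepNil _ _ hq1]
      | cons c t =>
        cases hfind : P.find? (fun pr => pr.1.isPrefixOf (c :: t)) with
        | some pr =>
          have hpr : pr ∈ P := List.mem_of_find?_eq_some hfind
          have hpre0 := List.find?_some hfind
          simp only at hpre0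
          have hpre : pr.1 <+: (c :: t) := List.isPrefixOf_iff_prefix.mp hpre0
          obtain ⟨w, hw⟩ := hpre
          have hprne := hne pr hpr
          have hdrop : t.drop (pr.1.length - 1) = w := by
            cases hp1 : pr.1 with
            | nil => exact absurd hp1 hprne
            | cons pc pt =>
              rw [hp1, List.cons_append] at hw
              have h1 : pt ++ w = t := by injection hw
              simp only [List.length_cons, Nat.add_sub_cancel]
              rw [← h1, List.drop_left]
          have hl' : t.length + 1 ≤ n + 1 := by simpa using hl
          have hwlen : w.length ≤ n := by
            have hlw := congrArg List.length hw
            cases hp1 : pr.1 with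
            | nil => exact absurd hp1 hprne
            | cons pc pt => rw [hp1] at hlw; simp at hlw; omega
          rw [pvScanConsSome P c t pr hfind, hdrop]
          rw [pvRepSplit q.1 q.2 hq1 pr.2 (pvScan P w) (fun k hk => by
            have := h3 pr hpr k hk
            exact pvPfxApp q.1 (pr.2.drop k) (pvScan P w) this.1 this.2)]
          rw [ih w hwlen]
          have hfind2 : (P ++ [q]).find? (fun pr => pr.1.isPrefixOf (c :: t)) = some pr := by
            rw [List.find?_append, hfind]; rfl
          rw [pvScanConsSome (P ++ [q]) c t pr hfind2, hdrop]
        | none =>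
          have hnone : ∀ pr ∈ P, ¬ pr.1 <+: (c :: t) := by
            intro pr hpr
            have := List.find?_eq_none.mp hfind pr hpr
            simpa [List.isPrefixOf_iff_prefix] using this
          by_cases hqp : q.1 <+: (c :: t)
          · obtain ⟨v, hv⟩ := hqp
            have hl' : t.length + 1 ≤ n + 1 := by simpa using hl
            have hvlen : v.length ≤ n := by
              have hlv := congrArg List.length hv
              cases hp1 : q.1 with
              | nil => exact absurd hp1 hq1
              | cons pc pt => rw [hp1] at hlv; simp at hlv; omega
            have hsp : pvScan P (q.1 ++ v) = q.1 ++ pvScan P v := by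
              apply pvScanSplit P q.1 v
              intro k hk pr hpr
              cases Nat.eq_zero_or_pos k with
              | inl h0 =>
                subst h0
                simp only [List.drop_zero]
                rw [hv]
                exact hnone pr hpr
              | inr hpos =>
                have := h4 pr hpr k hk (by omega)
                exact pvPfxApp pr.1 (q.1.drop k) v this.1 this.2
            have hfq : q.1.isPrefixOf (c :: t) = true :=
              List.isPrefixOf_iff_prefix.mpr ⟨v, hv⟩
            have hfind2 : (P ++ [q]).find? (fun pr => pr.1.isPrefixOf (c :: t)) = some q := by
              rw [List.find?_append, hfind]
              simp [List.find?, hfq]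
            have hdropq : t.drop (q.1.length - 1) = v := by
              cases hp1 : q.1 with
              | nil => exact absurd hp1 hq1
              | cons pc pt =>
                rw [hp1, List.cons_append] at hv
                have h1 : pt ++ v = t := by injection hv
                simp only [List.length_cons, Nat.add_sub_cancel]
                rw [← h1, List.drop_left]
            rw [pvScanConsSome (P ++ [q]) c t q hfind2, hdropq]
            have hsp2 : pvScan P (c :: t) = q.1 ++ pvScan P v := by
              rw [← hv]; exact hsp
            rw [hsp2, pvRepPrefix q.1 q.2 (pvScan P v) hq1, ih v hvlen]
          · have hscan : pvScan P (c :: t) = c :: pvScan P t :=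
              pvScanConsNone P c t hfind
            rw [hscan]
            have hnf : ¬ q.1 <+: (c :: pvScan P t) :=
              pvNFront P q.1 c t hne (fun pr hpr k hk hk1 => h5 pr hpr k hk hk1) hqp
            rw [pvRepCons q.1 q.2 c (pvScan P t) hq1 hnf]
            rw [ih t (by simpa using hl)]
            have hfind2 : (P ++ [q]).find? (fun pr => pr.1.isPrefixOf (c :: t)) = none := by
              rw [List.find?_append, hfind]
              have hb : q.1.isPrefixOf (c :: t) = false := by
                cases hx : q.1.isPrefixOf (c :: t)
                · rfl
                · exact absurd (List.isPrefixOf_iff_prefix.mp hx) hqp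
              simp [List.find?, hb]
            rw [pvScanConsNone (P ++ [q]) c t hfind2]
  intro l
  exact main l.length l (le_refl _)

lemma pvG1 : ∀ pr ∈ pvRules, pr.1 ≠ [] := by decide
lemma pvG3 : ∀ a ∈ pvRules, ∀ b ∈ pvRules, ∀ k, k < a.2.length → ¬ (b.1 <+: a.2.drop k) ∧ ¬ (a.2.drop k <+: b.1) := by decide
lemma pvG4 : ∀ a ∈ pvRules, ∀ b ∈ pvRules, ∀ k, k < a.1.length → 1 ≤ k → ¬ (b.1 <+: a.1.drop k) ∧ ¬ (a.1.drop k <+: b.1) := by decide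
lemma pvG5 : ∀ a ∈ pvRules, ∀ b ∈ pvRules, ∀ k, k < a.1.length → 1 ≤ k → ¬ (a.1.drop k <+: b.2) ∧ ¬ (b.2 <+: a.1.drop k) := by decide

lemma pvChainScan : ∀ l, pvChain pvRules l = pvScan pvRules l := by
  have htake : ∀ n, ∀ l, pvChain (pvRules.take n) l = pvScan (pvRules.take n) l := by
    intro n
    induction n with
    | zero => intro l; simp [pvChain, pvScanNilRules]
    | succ n ih =>
      by_cases hn : n < pvRules.length
      · intro l
        have hq : pvRules[n] ∈ pvRules := List.getElem_mem hn
        have htk : pvRules.take (n+1) = pvRules.take n ++ [pvRules[n]] := by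
          rw [List.take_succ]
          simp [List.getElem?_eq_getElem hn]
        have hchain : pvChain (pvRules.take (n+1)) l
            = PySem.Chars.replace (pvChain (pvRules.take n) l) pvRules[n].1 pvRules[n].2 := by
          unfold pvChain
          rw [htk, List.foldl_append]
          rfl
        rw [hchain, ih l, htk]
        exact pvStepCore (pvRules.take n) pvRules[n]
          (pvG1 _ hq)
          (fun pr hpr => pvG1 pr (List.take_subset _ _ hpr))
          (fun pr hpr k hk => pvG3 pr (List.take_subset _ _ hpr) pvRules[n] hq k hk)
          (fun pr hpr k hk hk1 => pvG4 pvRules[n] hq pr (List.take_subset _ _ hpr) k hk hk1)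
          (fun pr hpr k hk hk1 => pvG5 pvRules[n] hq pr (List.take_subset _ _ hpr) k hk hk1)
          l
      · intro l
        rw [List.take_of_length_le (by omega)]
        have := ih l
        rwa [List.take_of_length_le (by omega)] at this
  intro l
  have := htake pvRules.length l
  rwa [List.take_length] at this


lemma pvStrFold : ∀ (ps : List (String × String)) (w : String),
    (ps.foldl (fun s pr => PySem.Str.replace s pr.1 pr.2) w).toList
      = pvChain (ps.map (fun pr => (pr.1.toList, pr.2.toList))) w.toList := by
  intro ps
  induction ps with
  | nil => intro w; simp [pvChain]
  | cons p ps ih =>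
    intro w
    simp only [List.foldl_cons, List.map_cons]
    rw [ih (PySem.Str.replace w p.1 p.2)]
    simp only [pvChain, List.foldl_cons, PySem.Str.toList_replace]

set_option maxHeartbeats 2000000 in
lemma pvAfoldEq (w : String) :
    (List.foldl
      (fun wrapped rn =>
        PySem.Str.replace
          (List.foldl
            (fun wrapped directive =>
              PySem.Str.replace wrapped ("{% " ++ directive ++ " " ++ rn.1 ++ " %}")
                ("{% " ++ directive ++ " message.role == '" ++ rn.2 ++ "' %}"))
            wrapped ["if", "elif"])
          ("{{ " ++ rn.1 ++ " }}") "{{ message.content }}")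
      w
      [("system", "system"), ("prompt", "user"), ("user", "user"), ("response", "assistant"),
        ("assistant", "assistant")])
      = pvPairs.foldl (fun s pr => PySem.Str.replace s pr.1 pr.2) w := rfl

set_option maxHeartbeats 1000000 in
lemma pvKey (w : String) :
    List.foldl
      (fun wrapped rn =>
        PySem.Str.replace
          (List.foldl
            (fun wrapped directive =>
              PySem.Str.replace wrapped ("{% " ++ directive ++ " " ++ rn.1 ++ " %}")
                ("{% " ++ directive ++ " message.role == '" ++ rn.2 ++ "' %}"))
            wrapped ["if", "elif"])
          ("{{ " ++ rn.1 ++ " }}") "{{ message.content }}")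
      w
      [("system", "system"), ("prompt", "user"), ("user", "user"), ("response", "assistant"),
        ("assistant", "assistant")]
    = String.ofList
        (pvScan
          (List.map (fun pr => (pr.1.toList, pr.2.toList))
            (List.foldl
              (fun acc rn =>
                acc ++
                  [("{% if " ++ rn.1 ++ " %}", "{% if message.role == '" ++ rn.2 ++ "' %}"),
                    ("{% elif " ++ rn.1 ++ " %}", "{% elif message.role == '" ++ rn.2 ++ "' %}"),
                    ("{{ " ++ rn.1 ++ " }}", "{{ message.content }}")])
              []
              [("system", "system"), ("prompt", "user"), ("user", "user"), ("response", "assistant"),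
                ("assistant", "assistant")]))
          w.toList) := by
  have h2 : (List.foldl
      (fun acc rn =>
        acc ++
          [("{% if " ++ rn.1 ++ " %}", "{% if message.role == '" ++ rn.2 ++ "' %}"),
            ("{% elif " ++ rn.1 ++ " %}", "{% elif message.role == '" ++ rn.2 ++ "' %}"),
            ("{{ " ++ rn.1 ++ " }}", "{{ message.content }}")])
      ([] : List (String × String))
      [("system", "system"), ("prompt", "user"), ("user", "user"), ("response", "assistant"),
        ("assistant", "assistant")]) = pvPairs := by decide
  rw [h2, pvAfoldEq w]
  calc pvPairs.foldl (fun s pr => PySem.Str.replace s pr.1 pr.2) w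
      = String.ofList ((pvPairs.foldl (fun s pr => PySem.Str.replace s pr.1 pr.2) w).toList) :=
        (String.ofList_toList).symm
    _ = String.ofList (pvScan (List.map (fun pr => (pr.1.toList, pr.2.toList)) pvPairs) w.toList) := by
        rw [pvStrFold pvPairs w]
        exact congrArg String.ofList (pvChainScan w.toList)

-- ===== VERDICT (by name: the statement is the Claim_ definition above) =====
set_option maxHeartbeats 1000000 in
set_option maxRecDepth 8192 in
theorem wrap_template_with_messages_loop_spec : Claim_equal_wrap_template_with_messages_loop := by
  intro jinja_template _
  unfold Spec_wrap_template_with_messages_loop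
  unfold wrap_template_with_messages_loop wrap_template_with_messages_loop_alt
  dsimp only
  generalize (if PySem.Str.rfind jinja_template "<|assistant|>" = -1 then PySem.Str.len jinja_template
    else
      if PySem.Str.rfindFrom jinja_template "%}" 0 (some (PySem.Str.rfind jinja_template "<|assistant|>")) ≠ -1 then
        PySem.Str.rfindFrom jinja_template "%}" 0 (some (PySem.Str.rfind jinja_template "<|assistant|>")) + 2
      else PySem.Str.rfind jinja_template "<|assistant|>") = sp
  generalize PySem.Str.slice jinja_template none (some sp) = w
  generalize PySem.Str.slice jinja_template (some sp) none = fin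
  rw [pvKey w]
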